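-- pv_equiv track=rewrite | github.com/Caleb646/GMM | app/rfis/gmail_service.py | parse_email_address
-- ===== SOURCE A (Python) =====
-- def parse_email_address(email: str):
--     """
--     Emails from Gmail will sometimes be in the form
--     Name <email> or name email this function pulls the email out.
--     """
--     index = email.find("@")
--     if index == -1:
--         return "Unknown"
--     right = index
--     while right < len(email) and email[right] not in (">", "<", " ", "/"):
--         right += 1
--     left = index
--     while left >= 0 and email[left] not in (">", "<", " ", "/"):
--         left -= 1
--     return email[left + 1 : right]
-- ===== SOURCE B (Python) =====
-- def parse_email_address(email: str):
--     """Tokenize on the delimiter set, then return the first token containing '@'."""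
--     tokens = []
--     cur = []
--     for ch in email:
--         if ch in "<> /":
--             tokens.append(''.join(cur))
--             cur = []
--         else:
--             cur.append(ch)
--     tokens.append(''.join(cur))
--     for tok in tokens:
--         if '@' in tok:
--             return tok
--     return "Unknown"
-- ===== Notes on version B (the rewrite author's own statement) =====
-- stated objective: alternative
-- what changed: B tokenizes the whole string on the delimiter set {<,>,space,/} in one forward pass and returns the first token containing '@', instead of A's find-the-@-then-expand-left-and-right index scan.
import Mathlib
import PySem

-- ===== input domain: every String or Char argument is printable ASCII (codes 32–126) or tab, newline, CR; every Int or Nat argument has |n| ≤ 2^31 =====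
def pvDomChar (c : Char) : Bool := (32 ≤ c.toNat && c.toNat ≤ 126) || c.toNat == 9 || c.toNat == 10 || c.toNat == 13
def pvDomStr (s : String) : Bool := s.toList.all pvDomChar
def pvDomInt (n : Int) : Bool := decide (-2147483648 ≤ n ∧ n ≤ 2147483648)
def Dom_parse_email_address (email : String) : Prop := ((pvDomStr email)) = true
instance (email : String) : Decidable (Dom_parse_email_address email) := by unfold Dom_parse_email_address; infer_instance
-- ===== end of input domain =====

-- B replaces A's find-'@'-then-expand-left/right index scan by a single tokenize-on-delimiters
-- pass followed by selecting the first token containing '@' (alternative decomposition, same cost).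

-- ===== PORT A =====
-- 'email[i] not in (">", "<", " ", "/")', same comparison order as the tuple
def pvNotDelimA (c : Char) : Bool := !(c == '>' || c == '<' || c == ' ' || c == '/')

-- 'while right < len(email) and email[right] not in (...): right += 1'
def pvWhileRight (cs : List Char) (right : Nat) : Nat :=
  if h : right < cs.length then
    if pvNotDelimA cs[right] then pvWhileRight cs (right + 1) else right
  else right
termination_by cs.length - right

-- 'while left >= 0 and email[left] not in (...): left -= 1'
def pvWhileLeft (cs : List Char) (left : Int) : Int :=
  if h : 0 ≤ left then
    match PySem.List.pyGet? cs left with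
    | some c => if pvNotDelimA c then pvWhileLeft cs (left - 1) else left
    | none => left   -- IndexError; unreachable for the calls A makes (left ≤ index < len)
  else left
termination_by (left + 1).toNat
decreasing_by omega

def parse_email_address (email : String) : String :=
  let cs := email.toList
  let index := PySem.Chars.find cs ['@']
  if index = -1 then "Unknown"
  else
    let right := pvWhileRight cs index.toNat
    let left := pvWhileLeft cs index
    String.ofList (PySem.List.slice cs (some (left + 1)) (some (right : Int)))

-- ===== PORT B =====
-- 'ch in "<> /"'
def pvIsDelim (c : Char) : Bool := c == '<' || c == '>' || c == ' ' || c == '/'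

-- body of B's first loop: state = (tokens, cur)
def pvStep (st : List (List Char) × List Char) (ch : Char) : List (List Char) × List Char :=
  if pvIsDelim ch then (st.1 ++ [st.2], []) else (st.1, st.2 ++ [ch])

def parse_email_address_alt (email : String) : String :=
  let st := email.toList.foldl pvStep ([], [])
  let tokens := st.1 ++ [st.2]
  match tokens.find? (fun t => t.contains '@') with
  | some t => String.ofList t
  | none => "Unknown"

-- ===== PRECONDITION & SPEC =====
def Spec_parse_email_address (email : String) (out : String) : Prop := out = parse_email_address_alt email
instance (email : String) (out : String) : Decidable (Spec_parse_email_address email out) := by unfold Spec_parse_email_address; infer_instance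

-- ===== CLAIM (what is proved, stated in full; the proofs are below) =====
def Claim_equal_parse_email_address : Prop := ∀ (email : String), Dom_parse_email_address email → Spec_parse_email_address email (parse_email_address email)

-- ===== LEMMAS AND PROOFS =====

-- recursive view of B's tokenizer, used only by the proofs
def splitD : List Char → List (List Char)
  | [] => [[]]
  | c :: cs =>
      if pvIsDelim c then [] :: splitD cs
      else match splitD cs with
           | t :: ts => (c :: t) :: ts
           | [] => [[c]]

def consHead (cur : List Char) : List (List Char) → List (List Char)
  | [] => [cur]
  | t :: ts => (cur ++ t) :: ts

theorem pvIsDelim_eq (c : Char) : pvIsDelim c = !pvNotDelimA c := by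
  unfold pvIsDelim pvNotDelimA
  cases h1 : c == '>' <;> cases h2 : c == '<' <;> simp [h2] <;> simp [h1]

theorem splitD_head (cs : List Char) : ∃ ts, splitD cs = cs.takeWhile pvNotDelimA :: ts := by
  induction cs with
  | nil => exact ⟨[], rfl⟩
  | cons c cs ih =>
    obtain ⟨ts, hts⟩ := ih
    by_cases hd : pvIsDelim c = true
    · refine ⟨splitD cs, ?_⟩
      have hn : pvNotDelimA c = false := by
        have := pvIsDelim_eq c; rw [hd] at this; cases hh : pvNotDelimA c <;> simp [hh] at this ⊢
      simp [splitD, hd, List.takeWhile_cons, hn]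
    · have hn : pvNotDelimA c = true := by
        have := pvIsDelim_eq c; cases hh : pvNotDelimA c <;> simp [hh] at this <;> simp_all
      refine ⟨ts, ?_⟩
      simp [splitD, hd, hts, List.takeWhile_cons, hn]

theorem foldl_step_tokens (cs : List Char) (toks : List (List Char)) (cur : List Char) :
    (cs.foldl pvStep (toks, cur)).1 ++ [(cs.foldl pvStep (toks, cur)).2]
      = toks ++ consHead cur (splitD cs) := by
  induction cs generalizing toks cur with
  | nil => simp [consHead, splitD]
  | cons c cs ih =>
    by_cases hd : pvIsDelim c = true
    · rw [List.foldl_cons]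
      have : pvStep (toks, cur) c = (toks ++ [cur], []) := by simp [pvStep, hd]
      rw [this, ih]
      obtain ⟨ts, hts⟩ := splitD_head cs
      simp [splitD, hd, hts, consHead]
    · rw [List.foldl_cons]
      have : pvStep (toks, cur) c = (toks, cur ++ [c]) := by simp [pvStep, hd]
      rw [this, ih]
      obtain ⟨ts, hts⟩ := splitD_head cs
      simp [splitD, hd, hts, consHead]

theorem splitD_no_at {cs : List Char} (h : '@' ∉ cs) :
    ∀ t ∈ splitD cs, '@' ∉ t := by
  induction cs with
  | nil => intro t ht; simp [splitD] at ht; simp [ht]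
  | cons c cs ih =>
    have hc : c ≠ '@' := fun he => h (he ▸ List.mem_cons_self)
    have h' : '@' ∉ cs := fun hm => h (List.mem_cons_of_mem _ hm)
    intro t ht
    by_cases hd : pvIsDelim c = true
    · simp [splitD, hd] at ht
      rcases ht with ht | ht
      · simp [ht]
      · exact ih h' t ht
    · obtain ⟨ts, hts⟩ := splitD_head cs
      simp [splitD, hd, hts] at ht
      rcases ht with ht | ht
      · subst ht
        intro hm
        rcases List.mem_cons.mp hm with hm | hm
        · exact hc hm.symm
        · exact ih h' _ (by rw [hts]; exact List.mem_cons_self) hm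
      · exact ih h' t (by rw [hts]; exact List.mem_cons_of_mem _ ht)

theorem takeWhile_append_singleton_false {p : Char → Bool} {xs : List Char} {c : Char}
    (hc : p c = false) : (xs ++ [c]).takeWhile p = xs.takeWhile p := by
  rw [List.takeWhile_append]
  split_ifs with h
  · have : xs.takeWhile p = xs := (List.takeWhile_prefix p).eq_of_length h
    simp [List.takeWhile_cons, hc, this]
  · rfl

theorem takeWhile_append_singleton_true {p : Char → Bool} {xs : List Char} {c : Char}
    (hall : ∀ x ∈ xs, p x = true) (hc : p c = true) : (xs ++ [c]).takeWhile p = xs ++ [c] := by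
  rw [List.takeWhile_eq_self_iff]
  intro x hx
  rcases List.mem_append.mp hx with hx | hx
  · exact hall x hx
  · simp at hx; subst hx; exact hc

theorem splitD_find_at (pre post : List Char) (h : '@' ∉ pre) :
    (splitD (pre ++ '@' :: post)).find? (fun t => t.contains '@')
      = some ((pre.reverse.takeWhile pvNotDelimA).reverse ++ ('@' :: post).takeWhile pvNotDelimA) := by
  induction pre with
  | nil =>
    obtain ⟨ts, hts⟩ := splitD_head ('@' :: post)
    have hW : ('@' :: post).takeWhile pvNotDelimA = '@' :: post.takeWhile pvNotDelimA := by
      simp [List.takeWhile_cons]; decide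
    rw [List.nil_append, hts, List.find?_cons]
    have hcon : (('@' :: post).takeWhile pvNotDelimA).contains '@' = true := by
      rw [List.contains_iff_mem, hW]; exact List.mem_cons_self
    simp only [hcon]
    simp
  | cons c pre ih =>
    have hc : c ≠ '@' := fun he => h (he ▸ List.mem_cons_self)
    have h' : '@' ∉ pre := fun hm => h (List.mem_cons_of_mem _ hm)
    by_cases hd : pvIsDelim c = true
    · have hn : pvNotDelimA c = false := by
        have := pvIsDelim_eq c; rw [hd] at this; cases hh : pvNotDelimA c <;> simp [hh] at this ⊢
      have hR : ((c :: pre).reverse).takeWhile pvNotDelimA = pre.reverse.takeWhile pvNotDelimA := by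
        rw [List.reverse_cons]; exact takeWhile_append_singleton_false hn
      rw [List.cons_append]
      show (splitD (c :: (pre ++ '@' :: post))).find? (fun t => t.contains '@') = _
      rw [show splitD (c :: (pre ++ '@' :: post)) = [] :: splitD (pre ++ '@' :: post) by
        simp [splitD, hd]]
      rw [List.find?_cons]
      simp only [List.contains_nil]
      rw [ih h', hR]
    · have hn : pvNotDelimA c = true := by
        have := pvIsDelim_eq c; cases hh : pvNotDelimA c <;> simp [hh] at this <;> simp_all
      obtain ⟨ts, hts⟩ := splitD_head (pre ++ '@' :: post)
      have hsplit : splitD (c :: (pre ++ '@' :: post))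
          = (c :: (pre ++ '@' :: post).takeWhile pvNotDelimA) :: ts := by
        simp [splitD, hd, hts]
      rw [List.cons_append, hsplit, List.find?_cons]
      have hcontains : ((c :: (pre ++ '@' :: post).takeWhile pvNotDelimA).contains '@')
          = (((pre ++ '@' :: post).takeWhile pvNotDelimA).contains '@') := by
        rw [List.contains_cons]
        have : ('@' == c) = false := by
          cases hcc : ('@' == c)
          · rfl
          · exact absurd (LawfulBEq.eq_of_beq hcc).symm hc
        rw [this, Bool.false_or]
      by_cases hall : ∀ x ∈ pre, pvNotDelimA x = true
      · have hlen : (pre.takeWhile pvNotDelimA).length = pre.length := by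
          rw [List.takeWhile_eq_self_iff.mpr hall]
        have hu : (pre ++ '@' :: post).takeWhile pvNotDelimA
            = pre ++ ('@' :: post).takeWhile pvNotDelimA := by
          rw [List.takeWhile_append, if_pos hlen]
        have hW : ('@' :: post).takeWhile pvNotDelimA = '@' :: post.takeWhile pvNotDelimA := by
          simp [List.takeWhile_cons]; decide
        have hcon : ((pre ++ '@' :: post).takeWhile pvNotDelimA).contains '@' = true := by
          rw [List.contains_iff_mem, hu, hW]
          exact List.mem_append.mpr (Or.inr List.mem_cons_self)
        have hRfull : ((c :: pre).reverse).takeWhile pvNotDelimA = pre.reverse ++ [c] := by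
          rw [List.reverse_cons]
          exact takeWhile_append_singleton_true
            (fun x hx => hall x (List.mem_reverse.mp hx)) hn
        have hRfull' : (((c :: pre).reverse).takeWhile pvNotDelimA).reverse = c :: pre := by
          rw [hRfull]; simp
        rw [hRfull', hcontains, hcon, hu]
        simp
      · have hlen : ¬ (pre.takeWhile pvNotDelimA).length = pre.length := by
          intro hl
          exact hall fun x hx =>
            List.mem_takeWhile_imp ((List.takeWhile_prefix pvNotDelimA).eq_of_length hl ▸ hx)
        have hu : (pre ++ '@' :: post).takeWhile pvNotDelimA = pre.takeWhile pvNotDelimA := by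
          rw [List.takeWhile_append, if_neg hlen]
        have hcon : ((pre ++ '@' :: post).takeWhile pvNotDelimA).contains '@' = false := by
          rw [hu]
          cases hcc : (pre.takeWhile pvNotDelimA).contains '@'
          · rfl
          · exact absurd ((List.takeWhile_prefix pvNotDelimA).subset
              (List.contains_iff_mem.mp hcc)) h'
        have hR : ((c :: pre).reverse).takeWhile pvNotDelimA = pre.reverse.takeWhile pvNotDelimA := by
          rw [List.reverse_cons, List.takeWhile_append]
          split_ifs with hl
          · have : pre.reverse.takeWhile pvNotDelimA = pre.reverse :=
              (List.takeWhile_prefix pvNotDelimA).eq_of_length hl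
            exact absurd (fun x hx => List.mem_takeWhile_imp
              (this ▸ (List.mem_reverse.mpr hx))) hall
          · rfl
        rw [hR, hcontains, hcon]
        have h2 := ih h'
        rw [hts, List.find?_cons] at h2
        simp only [hcon] at h2
        simpa using h2

theorem find_at (pre post : List Char) (h : '@' ∉ pre) :
    PySem.Chars.find (pre ++ '@' :: post) ['@'] = (pre.length : Int) := by
  have hinf : ['@'] <:+: pre ++ '@' :: post := ⟨pre, post, by simp⟩
  have hpos : 0 ≤ PySem.Chars.find (pre ++ '@' :: post) ['@'] :=
    (PySem.Chars.find_nonneg_iff _ _).mpr hinf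
  obtain ⟨hpref, hmin⟩ := PySem.Chars.find_spec hpos
  have h1 : ¬ (PySem.Chars.find (pre ++ '@' :: post) ['@']).toNat < pre.length := by
    intro hlt
    obtain ⟨t, ht⟩ := hpref
    rw [List.drop_append_of_le_length (Nat.le_of_lt hlt),
      List.drop_eq_getElem_cons hlt] at ht
    have : pre[(PySem.Chars.find (pre ++ '@' :: post) ['@']).toNat] = '@' :=
      (List.cons.injEq _ _ _ _ ▸ ht).1.symm
    exact h (this ▸ List.getElem_mem hlt)
  have h2 : ¬ pre.length < (PySem.Chars.find (pre ++ '@' :: post) ['@']).toNat := by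
    intro hlt
    exact hmin pre.length hlt ⟨post, by simp⟩
  omega

theorem whileRight_aux (cs : List Char) (k : Nat) :
    ∀ r, cs.length - r ≤ k →
      pvWhileRight cs r = r + ((cs.drop r).takeWhile pvNotDelimA).length := by
  induction k with
  | zero =>
    intro r hr
    have h : ¬ r < cs.length := by omega
    rw [pvWhileRight, dif_neg h, List.drop_eq_nil_of_le (by omega)]
    simp
  | succ k ih =>
    intro r hr
    by_cases h : r < cs.length
    · rw [pvWhileRight, dif_pos h, List.drop_eq_getElem_cons h]
      cases hnd : pvNotDelimA cs[r]
      · rw [if_neg (by simp [hnd])]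
        simp [List.takeWhile_cons, hnd]
      · rw [if_pos (by simp [hnd])]
        rw [ih (r + 1) (by omega), List.takeWhile_cons, hnd]
        simp
        omega
    · rw [pvWhileRight, dif_neg h, List.drop_eq_nil_of_le (by omega)]
      simp

theorem whileRight_eq (cs : List Char) (r : Nat) :
    pvWhileRight cs r = r + ((cs.drop r).takeWhile pvNotDelimA).length :=
  whileRight_aux cs (cs.length - r) r le_rfl

theorem whileLeft_eq (cs : List Char) (i : Nat) (h : i < cs.length) :
    pvWhileLeft cs i = (i : Int) - (((cs.take (i + 1)).reverse.takeWhile pvNotDelimA).length : Int) := by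
  induction i with
  | zero =>
    have htake : cs.take 1 = [cs[0]] := by
      rw [List.take_add_one, List.take_zero, List.getElem?_eq_getElem h]
      rfl
    rw [pvWhileLeft, dif_pos (by omega)]
    rw [show ((0 : Nat) : Int) = ((0 : Nat) : Int) from rfl]
    rw [PySem.List.pyGet?_natCast, List.getElem?_eq_getElem h]
    simp only [htake]
    cases hnd : pvNotDelimA cs[0]
    · rw [if_neg (by simp [hnd])]
      simp [List.takeWhile_cons, hnd]
    · rw [if_pos (by simp [hnd])]
      rw [pvWhileLeft, dif_neg (by omega)]
      simp [List.takeWhile_cons, hnd]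
  | succ j ihj =>
    have hj : j < cs.length := by omega
    have htake : cs.take (j + 1 + 1) = cs.take (j + 1) ++ [cs[j + 1]] := by
      rw [List.take_add_one, List.getElem?_eq_getElem h]
      rfl
    rw [pvWhileLeft, dif_pos (by omega)]
    rw [show ((j + 1 : Nat) : Int) = (((j + 1 : Nat) : Nat) : Int) from rfl]
    rw [PySem.List.pyGet?_natCast, List.getElem?_eq_getElem h]
    rw [htake, List.reverse_append]
    simp only [List.reverse_cons, List.reverse_nil, List.nil_append, List.singleton_append,
      List.takeWhile_cons]
    cases hnd : pvNotDelimA cs[j + 1]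
    · rw [if_neg (by simp [hnd])]
      simp
    · rw [if_pos (by simp [hnd])]
      rw [show ((j + 1 : Nat) : Int) - 1 = ((j : Nat) : Int) by push_cast; ring]
      rw [ihj hj]
      simp

theorem parse_A_at (pre post : List Char) (h : '@' ∉ pre) :
    parse_email_address (String.ofList (pre ++ '@' :: post))
      = String.ofList ((pre.reverse.takeWhile pvNotDelimA).reverse ++ ('@' :: post).takeWhile pvNotDelimA) := by
  have hL : (pre.reverse.takeWhile pvNotDelimA).length ≤ pre.length := by
    have := (List.takeWhile_prefix (l := pre.reverse) pvNotDelimA).length_le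
    simpa using this
  have hlen : pre.length < (pre ++ '@' :: post).length := by simp
  have htake : (pre ++ '@' :: post).take (pre.length + 1) = pre ++ ['@'] := by
    rw [show pre ++ '@' :: post = (pre ++ ['@']) ++ post by simp]
    rw [show pre.length + 1 = (pre ++ ['@']).length by simp]
    rw [List.take_left]
  have hrevtake : (((pre ++ '@' :: post).take (pre.length + 1)).reverse).takeWhile pvNotDelimA
      = '@' :: pre.reverse.takeWhile pvNotDelimA := by
    rw [htake, List.reverse_append]
    simp only [List.reverse_cons, List.reverse_nil, List.nil_append, List.singleton_append]
    exact List.takeWhile_cons_of_pos (by decide)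
  unfold parse_email_address
  simp only [String.toList_ofList]
  rw [find_at pre post h]
  rw [if_neg (by omega : ¬ ((pre.length : Nat) : Int) = -1)]
  rw [Int.toNat_natCast, whileRight_eq, List.drop_left, whileLeft_eq _ _ hlen, hrevtake]
  simp only [List.length_cons]
  rw [show ((pre.length : Nat) : Int) - (((pre.reverse.takeWhile pvNotDelimA).length + 1 : Nat) : Int) + 1
      = ((pre.length - (pre.reverse.takeWhile pvNotDelimA).length : Nat) : Int) by
    rw [Nat.cast_sub hL]; push_cast; ring]
  rw [PySem.List.slice_natCast]
  congr 1
  have hsplit : pre = (pre.reverse.dropWhile pvNotDelimA).reverse ++ (pre.reverse.takeWhile pvNotDelimA).reverse := by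
    rw [← List.reverse_append, List.takeWhile_append_dropWhile, List.reverse_reverse]
  have hElen : (pre.reverse.dropWhile pvNotDelimA).length = pre.length - (pre.reverse.takeWhile pvNotDelimA).length := by
    have h1 : (pre.reverse.takeWhile pvNotDelimA).length + (pre.reverse.dropWhile pvNotDelimA).length = pre.length := by
      have h2 := congrArg List.length (List.takeWhile_append_dropWhile (p := pvNotDelimA) (l := pre.reverse))
      rw [List.length_append, List.length_reverse] at h2
      exact h2
    omega
  have hdrop : ((pre ++ '@' :: post).drop (pre.length - (pre.reverse.takeWhile pvNotDelimA).length))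
      = (pre.reverse.takeWhile pvNotDelimA).reverse ++ '@' :: post := by
    have hfull : pre ++ '@' :: post
        = (pre.reverse.dropWhile pvNotDelimA).reverse
            ++ ((pre.reverse.takeWhile pvNotDelimA).reverse ++ '@' :: post) := by
      conv_lhs => rw [hsplit]
      rw [List.append_assoc]
    rw [hfull, ← hElen, ← @List.length_reverse _ (pre.reverse.dropWhile pvNotDelimA)]
    rw [List.drop_left]
  rw [hdrop]
  have harith : pre.length + (('@' :: post).takeWhile pvNotDelimA).length
        - (pre.length - (pre.reverse.takeWhile pvNotDelimA).length)
      = (pre.reverse.takeWhile pvNotDelimA).reverse.length + (('@' :: post).takeWhile pvNotDelimA).length := by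
    simp only [List.length_reverse]
    omega
  rw [harith, List.take_append]
  rw [show (pre.reverse.takeWhile pvNotDelimA).reverse.length + (('@' :: post).takeWhile pvNotDelimA).length
        - (pre.reverse.takeWhile pvNotDelimA).reverse.length = (('@' :: post).takeWhile pvNotDelimA).length
    by omega]
  rw [List.take_of_length_le (Nat.le_add_right _ _)]
  congr 1
  exact (List.prefix_iff_eq_take.mp (List.takeWhile_prefix pvNotDelimA)).symm

theorem parse_B_eq (email : String) :
    parse_email_address_alt email
      = match (splitD email.toList).find? (fun t => t.contains '@') with
        | some t => String.ofList t
        | none => "Unknown" := by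
  simp only [parse_email_address_alt]
  have htok : (email.toList.foldl pvStep ([], [])).1 ++ [(email.toList.foldl pvStep ([], [])).2]
      = splitD email.toList := by
    rw [foldl_step_tokens, List.nil_append]
    obtain ⟨ts, hts⟩ := splitD_head email.toList
    rw [hts]
    simp [consHead]
  rw [htok]

-- ===== VERDICT (by name: the statement is the Claim_ definition above) =====
theorem first_at (cs : List Char) (h : '@' ∈ cs) :
    ∃ pre post, cs = pre ++ '@' :: post ∧ '@' ∉ pre := by
  induction cs with
  | nil => cases h
  | cons c cs ih =>
    by_cases hc : c = '@'
    · exact ⟨[], cs, by simp [hc], by simp⟩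
    · have hm : '@' ∈ cs := by
        rcases List.mem_cons.mp h with h | h
        · exact absurd h.symm hc
        · exact h
      obtain ⟨pre, post, heq, hpre⟩ := ih hm
      exact ⟨c :: pre, post, by simp [heq], by
        intro hx
        rcases List.mem_cons.mp hx with hx | hx
        · exact hc hx.symm
        · exact hpre hx⟩

theorem parse_email_address_spec : Claim_equal_parse_email_address := by
  intro email _
  unfold Spec_parse_email_address
  rw [parse_B_eq]
  by_cases hmem : '@' ∈ email.toList
  · obtain ⟨pre, post, heq, hpre⟩ := first_at email.toList hmem
    have hA : parse_email_address email
        = String.ofList ((pre.reverse.takeWhile pvNotDelimA).reverse ++ ('@' :: post).takeWhile pvNotDelimA) := by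
      conv_lhs => rw [← String.ofList_toList (s := email), heq]
      exact parse_A_at pre post hpre
    rw [hA, heq, splitD_find_at pre post hpre]
  · have hfind : PySem.Chars.find email.toList ['@'] = -1 := by
      rw [PySem.Chars.find_eq_neg_one_iff]
      intro hinf
      exact hmem (hinf.sublist.subset (by simp))
    have hA : parse_email_address email = "Unknown" := by
      simp only [parse_email_address]
      rw [hfind]
      rfl
    have hB : (splitD email.toList).find? (fun t => t.contains '@') = none := by
      rw [List.find?_eq_none]
      intro t ht hcon
      exact splitD_no_at hmem t ht (List.contains_iff_mem.mp hcon)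
    rw [hA, hB]
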